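-- pv_equiv track=rewrite | github.com/SadP0tat0/uzdaviniai | funcijos0306.py | count_LS
-- ===== SOURCE A (Python) =====
-- def count_LS(sakinys, char=None):
--     raides = 0
--     tarpai = 0
--     for char in sakinys:
--         if char != ' ':
--             raides += 1
--         elif char == ' ':
--             tarpai += 1
--     return raides, tarpai
-- ===== SOURCE B (Python) =====
-- def count_LS(sakinys, char=None):
--     dalys = sakinys.split(' ')
--     return sum(map(len, dalys)), len(dalys) - 1
-- ===== Notes on version B (the rewrite author's own statement) =====
-- stated objective: alternative
-- what changed: Instead of scanning characters with two counters, B splits the string on the space separator and reads both answers off the part list: spaces = number of parts minus one, non-spaces = total length of the parts.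
import Mathlib
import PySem

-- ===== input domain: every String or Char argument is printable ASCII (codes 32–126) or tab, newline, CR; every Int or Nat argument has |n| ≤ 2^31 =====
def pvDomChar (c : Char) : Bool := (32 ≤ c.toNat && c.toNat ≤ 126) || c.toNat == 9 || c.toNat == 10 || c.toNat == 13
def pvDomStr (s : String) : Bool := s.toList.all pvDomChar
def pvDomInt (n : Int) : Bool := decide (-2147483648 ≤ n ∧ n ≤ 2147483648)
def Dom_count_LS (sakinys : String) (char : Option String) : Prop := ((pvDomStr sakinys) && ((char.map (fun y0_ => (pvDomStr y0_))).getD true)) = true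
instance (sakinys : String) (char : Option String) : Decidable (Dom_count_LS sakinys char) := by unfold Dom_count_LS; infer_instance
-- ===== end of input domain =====

-- B splits the string on the space separator and reads both counts off the part list (spaces = parts−1, non-spaces = total part length); 'char' stays an unused parameter as in A.
-- ===== PORT A =====
def count_LS (sakinys : String) (char : Option String) : Int × Int :=
  let raides : Int := 0
  let tarpai : Int := 0
  let st := sakinys.toList.foldl
    (fun (p : Int × Int) (c : Char) =>
      if c != ' ' then (p.1 + 1, p.2)
      else if c == ' ' then (p.1, p.2 + 1)
      else p)
    (raides, tarpai)
  (st.1, st.2)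

-- ===== PORT B =====
def count_LS_alt (sakinys : String) (char : Option String) : Int × Int :=
  let dalys : List (List Char) := PySem.Chars.splitOn sakinys.toList [' ']
  (((dalys.map List.length).sum : Int), (dalys.length : Int) - 1)

-- ===== PRECONDITION & SPEC =====
def Spec_count_LS (sakinys : String) (char : Option String) (out : Int × Int) : Prop := out = count_LS_alt sakinys char
instance (sakinys : String) (char : Option String) (out : Int × Int) : Decidable (Spec_count_LS sakinys char out) := by unfold Spec_count_LS; infer_instance

-- ===== CLAIM (what is proved, stated in full; the proofs are below) =====
def Claim_equal_count_LS : Prop := ∀ (sakinys : String) (char : Option String), Dom_count_LS sakinys char → Spec_count_LS sakinys char (count_LS sakinys char)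

-- ===== LEMMAS AND PROOFS =====

-- A's loop: counts non-spaces and spaces
lemma foldl_AB (l : List Char) : ∀ (a b : Int),
    l.foldl (fun (p : Int × Int) (c : Char) =>
      if c != ' ' then (p.1 + 1, p.2)
      else if c == ' ' then (p.1, p.2 + 1)
      else p) (a, b)
    = (a + (l.length : Int) - (l.count ' ' : Int), b + (l.count ' ' : Int)) := by
  induction l with
  | nil => intro a b; simp
  | cons x t ih =>
    intro a b
    by_cases hx : x = ' '
    · subst hx
      simp only [List.foldl_cons, bne_self_eq_false, BEq.rfl, if_true, ih]
      simp
      constructor <;> ring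
    · simp only [List.foldl_cons, ih]
      simp [hx]
      ring

-- splitOn.go with sep [' ']: part count and total part length
lemma go_stats : ∀ (fuel : Nat) (l cur : List Char) (acc : List (List Char)),
    l.length < fuel →
    (PySem.Chars.splitOn.go [' '] fuel l cur acc).length = acc.length + l.count ' ' + 1 ∧
    ((PySem.Chars.splitOn.go [' '] fuel l cur acc).map List.length).sum + l.count ' '
      = ((acc.map List.length).sum + cur.length) + l.length := by
  intro fuel
  induction fuel with
  | zero => intro l cur acc h; omega
  | succ n ih =>
    intro l cur acc h
    cases l with
    | nil => simp [PySem.Chars.splitOn.go]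
    | cons c rest =>
      have hr : rest.length < n := by simpa using Nat.lt_succ_iff.mp (by simpa using h)
      by_cases hc : c = ' '
      · subst hc
        have hpre : [' '].isPrefixOf (' ' :: rest) = true := by simp [List.isPrefixOf]
        simp only [PySem.Chars.splitOn.go, hpre, if_pos]
        rw [show List.drop (List.length [' ']) (' ' :: rest) = rest by simp]
        obtain ⟨h1, h2⟩ := ih rest [] (cur.reverse :: acc) hr
        simp only [List.map_cons, List.sum_cons, List.length_reverse, List.length_cons,
          List.length_nil, List.count_cons] at h1 h2 ⊢
        simp
        omega
      · have hpre : [' '].isPrefixOf (c :: rest) = false := by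
          simp [List.isPrefixOf]
          exact fun hh => hc hh.symm
        simp only [PySem.Chars.splitOn.go, hpre, Bool.false_eq_true, if_false]
        obtain ⟨h1, h2⟩ := ih rest (c :: cur) acc hr
        have hc' : (c == ' ') = false := by simp [hc]
        simp only [List.length_cons, List.count_cons, hc', Bool.false_eq_true, if_false] at h1 h2 ⊢
        omega

lemma splitOn_stats (l : List Char) :
    (PySem.Chars.splitOn l [' ']).length = l.count ' ' + 1 ∧
    ((PySem.Chars.splitOn l [' ']).map List.length).sum + l.count ' ' = l.length := by
  have := go_stats (l.length + 1) l [] [] (Nat.lt_succ_self _)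
  simpa [PySem.Chars.splitOn] using this

-- ===== VERDICT (by name: the statement is the Claim_ definition above) =====
theorem count_LS_spec : Claim_equal_count_LS := by
  intro s char _
  simp only [Spec_count_LS, count_LS, count_LS_alt]
  rw [foldl_AB]
  obtain ⟨h1, h2⟩ := splitOn_stats s.toList
  have hle : s.toList.count ' ' ≤ s.toList.length := List.count_le_length
  rw [h1]
  simp only [Prod.mk.injEq]
  constructor
  · have h3 : ((PySem.Chars.splitOn s.toList [' ']).map List.length).sum
        = s.toList.length - s.toList.count ' ' := by omega
    rw [h3]
    push_cast [Nat.cast_sub hle]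
    ring
  · push_cast
    ring
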